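-- pv_equiv track=rewrite | github.com/Ellie010707/coding-test-study | 프로그래머스/3/84021. 퍼즐 조각 채우기/퍼즐 조각 채우기.py | makePiece
-- ===== SOURCE A (Python) =====
-- def makePiece(piece):
--     xs, ys = zip(*piece)
--     xSize = max(xs) - min(xs) + 1
--     ySize = max(ys) - min(ys) + 1
--     xs = [x - min(xs) for x in xs]
--     ys = [y - min(ys) for y in ys]
--     tmp_piece = [[0 for _ in range(ySize)] for _ in range(xSize)]
--     for x, y in zip(xs, ys):
--         tmp_piece[x][y] = 1
--     return tmp_piece
-- ===== SOURCE B (Python) =====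
-- def makePiece(piece):
--     xs, ys = zip(*piece)
--     xmin, ymin = min(xs), min(ys)
--     h = max(xs) - xmin + 1
--     w = max(ys) - ymin + 1
--     grid = []
--     for i in range(h):
--         cols = sorted({y - ymin for x, y in piece if x - xmin == i})
--         row = []
--         prev = -1
--         for c in cols:
--             row += [0] * (c - prev - 1)
--             row.append(1)
--             prev = c
--         row += [0] * (w - 1 - prev)
--         grid.append(row)
--     return grid
-- ===== Notes on version B (the rewrite author's own statement) =====
-- stated objective: alternative
-- what changed: Instead of mutating cells of a pre-allocated zero grid point by point, B builds each row independently by sorting that row's distinct column indices and emitting runs of zeros between consecutive marked columns (run-length construction), never touching a cell twice or testing per-cell membership.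
import Mathlib
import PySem

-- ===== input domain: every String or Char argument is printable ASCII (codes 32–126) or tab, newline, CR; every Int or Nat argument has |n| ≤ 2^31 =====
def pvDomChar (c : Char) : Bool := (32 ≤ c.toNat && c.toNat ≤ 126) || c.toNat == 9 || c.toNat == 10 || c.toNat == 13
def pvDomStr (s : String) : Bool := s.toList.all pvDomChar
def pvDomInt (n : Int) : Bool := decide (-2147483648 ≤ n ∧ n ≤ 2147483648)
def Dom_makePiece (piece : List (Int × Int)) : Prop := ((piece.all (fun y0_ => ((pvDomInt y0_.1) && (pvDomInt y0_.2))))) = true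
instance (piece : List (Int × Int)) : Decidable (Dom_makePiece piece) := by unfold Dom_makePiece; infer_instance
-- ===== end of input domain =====

-- B replaces A's mutate-cells-of-a-zero-grid loop by a per-row run-length construction:
-- each row is built from its sorted distinct column indices by emitting runs of zeros
-- between marked columns (objective: alternative; similar cost).

-- ===== PORT A =====
-- the 'for x, y in zip(xs, ys): tmp_piece[x][y] = 1' loop; indices are nonnegative and in
-- range for the grids A builds, so Int.toNat / List.set are exact here
def makePieceFill (g : List (List Int)) (pts : List (Int × Int)) : List (List Int) :=
  pts.foldl (fun g p => g.modify p.1.toNat (fun row => row.set p.2.toNat 1)) g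

def makePiece (piece : List (Int × Int)) : List (List Int) :=
  if piece.isEmpty then []   -- Python: 'xs, ys = zip(*piece)' raises ValueError here; excluded by Pre_
  else
    let xs := piece.map Prod.fst
    let ys := piece.map Prod.snd
    let xSize := (PySem.List.max? xs (fun v => v)).getD 0 - (PySem.List.min? xs (fun v => v)).getD 0 + 1
    let ySize := (PySem.List.max? ys (fun v => v)).getD 0 - (PySem.List.min? ys (fun v => v)).getD 0 + 1
    let xs' := xs.map (fun x => x - (PySem.List.min? xs (fun v => v)).getD 0)
    let ys' := ys.map (fun y => y - (PySem.List.min? ys (fun v => v)).getD 0)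
    let tmp := (List.range xSize.toNat).map (fun _ => (List.range ySize.toNat).map (fun _ => (0 : Int)))
    makePieceFill tmp (xs'.zip ys')

-- ===== PORT B =====
-- the inner 'for c in cols: row += [0]*(c-prev-1); row.append(1); prev = c' loop plus the
-- final 'row += [0]*(w-1-prev)'; Python's [0]*k is empty for k ≤ 0, matching .toNat
def makePieceRow (w : Int) (cols : List Int) : List Int :=
  let s := cols.foldl
    (fun (s : List Int × Int) c => (s.1 ++ List.replicate (c - s.2 - 1).toNat 0 ++ [1], c))
    ([], -1)
  s.1 ++ List.replicate (w - 1 - s.2).toNat 0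

def makePiece_alt (piece : List (Int × Int)) : List (List Int) :=
  if piece.isEmpty then []   -- Python: 'xs, ys = zip(*piece)' raises ValueError here; excluded by Pre_
  else
    let xs := piece.map Prod.fst
    let ys := piece.map Prod.snd
    let xmin := (PySem.List.min? xs (fun v => v)).getD 0
    let ymin := (PySem.List.min? ys (fun v => v)).getD 0
    let h := (PySem.List.max? xs (fun v => v)).getD 0 - xmin + 1
    let w := (PySem.List.max? ys (fun v => v)).getD 0 - ymin + 1
    (List.range h.toNat).map (fun (i : Nat) =>
      let cols := PySem.List.sorted
        (PySem.Set.ofList ((piece.filter (fun p => p.1 - xmin == (i : Int))).map (fun p => p.2 - ymin)))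
        (fun v => v) false
      makePieceRow w cols)

-- ===== PRECONDITION & SPEC =====
-- Pre_ excludes only the empty list, on which A's 'xs, ys = zip(*piece)' raises ValueError
def Pre_makePiece (piece : List (Int × Int)) : Prop := piece ≠ []
instance (piece : List (Int × Int)) : Decidable (Pre_makePiece piece) := by unfold Pre_makePiece; infer_instance

def pvWitness_makePiece : (List (Int × Int)) := [(2, -1), (3, 0), (2, 0)]

def Spec_makePiece (piece : List (Int × Int)) (out : List (List Int)) : Prop := out = makePiece_alt piece
instance (piece : List (Int × Int)) (out : List (List Int)) : Decidable (Spec_makePiece piece out) := by unfold Spec_makePiece; infer_instance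

-- ===== CLAIM (what is proved, stated in full; the proofs are below) =====
def Claim_equal_makePiece : Prop := ∀ (piece : List (Int × Int)), Dom_makePiece piece → Pre_makePiece piece → Spec_makePiece piece (makePiece piece)

-- ===== LEMMAS AND PROOFS =====

-- the per-cell membership grid, used as the common middle form for both ports
def memGrid (piece : List (Int × Int)) (minX minY W H : Int) : List (List Int) :=
  (List.range W.toNat).map (fun (i : Nat) =>
    (List.range H.toNat).map (fun (j : Nat) =>
      if ((i : Int), (j : Int)) ∈ PySem.Set.ofList (piece.map (fun q => (q.1 - minX, q.2 - minY)))
      then (1 : Int) else 0))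

-- ---------- A-side: the fill loop equals the membership grid ----------

theorem fill_length (pts : List (Int × Int)) (g : List (List Int)) :
    (makePieceFill g pts).length = g.length := by
  induction pts generalizing g with
  | nil => rfl
  | cons p pts ih => simp [makePieceFill, List.foldl_cons] at ih ⊢; rw [ih]; simp

theorem fill_row_length (pts : List (Int × Int)) (g : List (List Int)) (i : Nat) :
    ((makePieceFill g pts)[i]?).map List.length = (g[i]?).map List.length := by
  induction pts generalizing g with
  | nil => rfl
  | cons p pts ih =>
    simp only [makePieceFill, List.foldl_cons] at ih ⊢
    rw [ih, List.getElem?_modify]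
    cases g[i]? with
    | none => rfl
    | some row => simp; split <;> simp

theorem fill_get2 (pts : List (Int × Int)) (g : List (List Int)) (m : Nat)
    (hrow : ∀ r ∈ g, r.length = m)
    (hpts : ∀ p ∈ pts, p.1.toNat < g.length ∧ p.2.toNat < m) (i j : Nat) :
    ((makePieceFill g pts)[i]?.bind (fun r => r[j]?)) =
      if ∃ p ∈ pts, p.1.toNat = i ∧ p.2.toNat = j then some 1
      else (g[i]?.bind (fun r => r[j]?)) := by
  induction pts generalizing g with
  | nil => simp [makePieceFill]
  | cons p pts ih =>
    have hin := hpts p (by simp)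
    simp only [makePieceFill, List.foldl_cons] at ih ⊢
    have hrow' : ∀ r ∈ g.modify p.1.toNat (fun row => row.set p.2.toNat 1), r.length = m := by
      intro r hr
      rcases List.mem_iff_getElem?.1 hr with ⟨k, hk⟩
      rw [List.getElem?_modify] at hk
      cases hg : g[k]? with
      | none => rw [hg] at hk; simp at hk
      | some r0 =>
        rw [hg] at hk; simp at hk
        have h0 := hrow r0 (List.mem_of_getElem? hg)
        split at hk <;> simp [← hk, h0]
    have hpts' : ∀ q ∈ pts, q.1.toNat < (g.modify p.1.toNat (fun row => row.set p.2.toNat 1)).length ∧ q.2.toNat < m := by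
      intro q hq; simpa using hpts q (by simp [hq])
    rw [ih _ hrow' hpts']
    by_cases hrest : ∃ q ∈ pts, q.1.toNat = i ∧ q.2.toNat = j
    · simp only [hrest, if_pos]
      have : ∃ q ∈ p :: pts, q.1.toNat = i ∧ q.2.toNat = j := by
        rcases hrest with ⟨q, hq, h⟩; exact ⟨q, by simp [hq], h⟩
      rw [if_pos this]
    · rw [if_neg hrest]
      rw [List.getElem?_modify]
      by_cases hp : p.1.toNat = i ∧ p.2.toNat = j
      · have hcond : ∃ q ∈ p :: pts, q.1.toNat = i ∧ q.2.toNat = j := ⟨p, by simp, hp⟩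
        rw [if_pos hcond]
        rcases hp with ⟨h1, h2⟩
        subst h1; subst h2
        cases hg : g[p.1.toNat]? with
        | none => exact absurd (List.getElem?_eq_some_iff.2 ⟨hin.1, rfl⟩).symm (by simp [hg])
        | some row =>
          have hl := hrow row (List.mem_of_getElem? hg)
          simp [hl, hin.2]
      · have hcond : ¬ ∃ q ∈ p :: pts, q.1.toNat = i ∧ q.2.toNat = j := by
          rintro ⟨q, hq, h⟩
          rcases List.mem_cons.1 hq with rfl | hq'
          · exact hp h
          · exact hrest ⟨q, hq', h⟩
        rw [if_neg hcond]
        by_cases hpi : p.1.toNat = i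
        · subst hpi
          cases hg : g[p.1.toNat]? with
          | none => simp
          | some row =>
            simp only [Option.bind_some]
            have hpj : p.2.toNat ≠ j := fun h => hp ⟨rfl, h⟩
            simp [hpj]
        · simp [hpi]

theorem grids_eq (piece : List (Int × Int)) (minX minY maxX maxY : Int)
    (hminX : ∀ q ∈ piece, minX ≤ q.1) (hmaxX : ∀ q ∈ piece, q.1 ≤ maxX)
    (hminY : ∀ q ∈ piece, minY ≤ q.2) (hmaxY : ∀ q ∈ piece, q.2 ≤ maxY) :
    makePieceFill
        ((List.range (maxX - minX + 1).toNat).map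
          (fun _ => (List.range (maxY - minY + 1).toNat).map (fun _ => (0 : Int))))
        (((piece.map Prod.fst).map (fun x => x - minX)).zip
          ((piece.map Prod.snd).map (fun y => y - minY)))
      = memGrid piece minX minY (maxX - minX + 1) (maxY - minY + 1) := by
  unfold memGrid
  set W := (maxX - minX + 1).toNat with hW
  set H := (maxY - minY + 1).toNat with hH
  set shifted := piece.map (fun q => (q.1 - minX, q.2 - minY)) with hsh
  have hzip : ((piece.map Prod.fst).map (fun x => x - minX)).zip
      ((piece.map Prod.snd).map (fun y => y - minY)) = shifted := by
    simp only [List.map_map, hsh]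
    rw [List.zip_map']
    rfl
  rw [hzip]
  set tmp := (List.range W).map (fun _ => (List.range H).map (fun _ => (0 : Int))) with htmp
  have htmpget : ∀ i : Nat, tmp[i]? = if i < W then some ((List.range H).map (fun _ => (0 : Int))) else none := by
    intro i; by_cases h : i < W <;> simp [htmp, h]
  have hrow : ∀ r ∈ tmp, r.length = H := by
    intro r hr; simp [htmp] at hr; rcases hr with ⟨_, _, rfl⟩; simp
  have hshmem : ∀ s ∈ shifted, 0 ≤ s.1 ∧ 0 ≤ s.2 ∧ s.1.toNat < W ∧ s.2.toNat < H := by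
    intro s hs
    simp only [hsh, List.mem_map] at hs
    rcases hs with ⟨q, hq, rfl⟩
    have h1 := hminX q hq; have h2 := hmaxX q hq
    have h3 := hminY q hq; have h4 := hmaxY q hq
    refine ⟨by omega, by omega, ?_, ?_⟩ <;> omega
  have hpts : ∀ s ∈ shifted, s.1.toNat < tmp.length ∧ s.2.toNat < H := by
    intro s hs; rcases hshmem s hs with ⟨_, _, h1, h2⟩
    constructor
    · simpa [htmp] using h1
    · exact h2
  apply List.ext_getElem?
  intro i
  by_cases hi : i < W
  · have hr2 : ((List.range W).map (fun (i : Nat) =>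
        (List.range H).map (fun (j : Nat) =>
          if ((i : Int), (j : Int)) ∈ PySem.Set.ofList shifted then (1 : Int) else 0)))[i]? =
        some ((List.range H).map (fun (j : Nat) =>
          if ((i : Int), (j : Int)) ∈ PySem.Set.ofList shifted then (1 : Int) else 0)) := by
      simp [hi]
    rw [hr2]
    cases hA : (makePieceFill tmp shifted)[i]? with
    | none =>
      have : i < (makePieceFill tmp shifted).length := by
        rw [fill_length]; simp [htmp]; omega
      exact absurd hA (by simp; omega)
    | some rowA =>
      have hlenA : rowA.length = H := by
        have := fill_row_length shifted tmp i
        rw [hA, htmpget i, if_pos hi] at this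
        simpa using this
      congr 1
      apply List.ext_getElem?
      intro j
      have hget2 := fill_get2 shifted tmp H hrow hpts i j
      rw [hA, htmpget i, if_pos hi] at hget2
      simp only [Option.bind_some] at hget2
      by_cases hj : j < H
      · have hmem : (∃ s ∈ shifted, s.1.toNat = i ∧ s.2.toNat = j) ↔
            ((i : Int), (j : Int)) ∈ shifted := by
          constructor
          · rintro ⟨s, hs, h1, h2⟩
            rcases hshmem s hs with ⟨hn1, hn2, _, _⟩
            have : s = ((i : Int), (j : Int)) := by
              apply Prod.ext <;> simp <;> omega
            rw [← this]; exact hs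
          · intro hs
            exact ⟨((i : Int), (j : Int)), hs, by simp, by simp⟩
        rw [← PySem.Set.mem_ofList] at hmem
        by_cases hc : ((i : Int), (j : Int)) ∈ PySem.Set.ofList shifted
        · rw [if_pos (hmem.2 hc)] at hget2
          have hc' := (PySem.Set.mem_ofList shifted ((i : Int), (j : Int))).1 hc
          simp [hj, hget2, hc']
        · rw [if_neg (fun h => hc (hmem.1 h))] at hget2
          have hc' : ¬ ((i : Int), (j : Int)) ∈ shifted :=
            fun h => hc ((PySem.Set.mem_ofList shifted ((i : Int), (j : Int))).2 h)
          simp [hj] at hget2 ⊢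
          simp [hget2, hc']
      · have hno : ¬ ∃ s ∈ shifted, s.1.toNat = i ∧ s.2.toNat = j := by
          rintro ⟨s, hs, _, h2⟩
          rcases hshmem s hs with ⟨_, _, _, h⟩; omega
        rw [if_neg hno] at hget2
        simp [hj] at hget2 ⊢
        omega
  · have h1 : (makePieceFill tmp shifted)[i]? = none := by
      rw [List.getElem?_eq_none]; rw [fill_length]; simp [htmp]; omega
    have h2 : ((List.range W).map (fun (i : Nat) =>
        (List.range H).map (fun (j : Nat) =>
          if ((i : Int), (j : Int)) ∈ PySem.Set.ofList shifted then (1 : Int) else 0)))[i]? = none := by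
      rw [List.getElem?_eq_none]; simp; omega
    rw [h1, h2]

-- ---------- B-side: run-length rows equal the membership rows ----------

-- recursive reformulation of the fold in makePieceRow (proof-only)
def rowRec (w : Int) : Int → List Int → List Int
  | prev, [] => List.replicate (w - 1 - prev).toNat 0
  | prev, c :: cs => List.replicate (c - prev - 1).toNat 0 ++ 1 :: rowRec w c cs

theorem foldl_row_eq (w : Int) (cols : List Int) : ∀ (acc : List Int) (prev : Int),
    (cols.foldl (fun (s : List Int × Int) c => (s.1 ++ List.replicate (c - s.2 - 1).toNat 0 ++ [1], c)) (acc, prev)).1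
      ++ List.replicate (w - 1 - (cols.foldl (fun (s : List Int × Int) c => (s.1 ++ List.replicate (c - s.2 - 1).toNat 0 ++ [1], c)) (acc, prev)).2).toNat 0
    = acc ++ rowRec w prev cols := by
  induction cols with
  | nil => intro acc prev; simp [rowRec]
  | cons c cs ih =>
    intro acc prev
    simp only [List.foldl_cons]
    rw [ih]
    simp [rowRec]

theorem makePieceRow_eq_rowRec (w : Int) (cols : List Int) :
    makePieceRow w cols = rowRec w (-1) cols := by
  unfold makePieceRow
  simpa using foldl_row_eq w cols [] (-1)

theorem map_range_split (n1 m : Nat) (f : Nat → Int) :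
    List.map f (List.range (n1 + (1 + m))) =
      List.map f (List.range n1) ++ f n1 :: List.map (fun k => f (n1 + 1 + k)) (List.range m) := by
  simp only [List.range_add, List.map_append, List.map_map, List.range_one,
    List.map_cons, List.map_nil]
  rw [List.cons_append, List.nil_append, Nat.add_zero]
  congr 2
  apply List.map_congr_left
  intro k _
  simp only [Function.comp_apply]
  congr 1
  omega

theorem rowRec_eq_map (w : Int) (cols : List Int) : ∀ (prev : Int),
    cols.Pairwise (· < ·) → (∀ c ∈ cols, prev < c) → (∀ c ∈ cols, c < w) →
    rowRec w prev cols =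
      (List.range (w - 1 - prev).toNat).map
        (fun (k : Nat) => if (prev + 1 + (k : Int)) ∈ cols then (1 : Int) else 0) := by
  induction cols with
  | nil => intro prev _ _ _; simp [rowRec]
  | cons c cs ih =>
    intro prev hpw hlo hhi
    have hc : prev < c := hlo c (by simp)
    have hcw : c < w := hhi c (by simp)
    have hcs : ∀ d ∈ cs, c < d := fun d hd => (List.pairwise_cons.1 hpw).1 d hd
    have hn1 : (((c - prev - 1).toNat : Nat) : Int) = c - prev - 1 := by omega
    have hsplit : (w - 1 - prev).toNat = (c - prev - 1).toNat + (1 + (w - 1 - c).toNat) := by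
      omega
    rw [hsplit, map_range_split, rowRec]
    congr 1
    · -- leading zeros: prev+1+k < c for k < (c-prev-1).toNat
      rw [eq_comm, List.eq_replicate_iff]
      refine ⟨by simp, ?_⟩
      intro b hb
      rcases List.mem_map.1 hb with ⟨k, hk, rfl⟩
      rw [List.mem_range] at hk
      have hklt : prev + 1 + (k : Int) < c := by omega
      have hnm : ¬ (prev + 1 + (k : Int) ∈ c :: cs) := by
        intro hmem
        rcases List.mem_cons.1 hmem with h | h
        · omega
        · have := hcs _ h; omega
      rw [if_neg hnm]
    · congr 1
      · -- the marked column itself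
        have heq : prev + 1 + (((c - prev - 1).toNat : Nat) : Int) = c := by omega
        rw [heq, if_pos (List.mem_cons_self)]
      · -- the tail equals the recursive call
        rw [ih c hpw.of_cons hcs (fun d hd => hhi d (by simp [hd]))]
        apply List.map_congr_left
        intro k hk
        have h1 : prev + 1 + ((((c - prev - 1).toNat + 1 + k : Nat)) : Int) = c + 1 + (k : Int) := by
          push_cast [hn1]; omega
        rw [h1]
        have hne : c + 1 + (k : Int) ≠ c := by omega
        simp only [List.mem_cons, hne, false_or]

-- the B port equals the membership grid
theorem alt_eq_memGrid (piece : List (Int × Int)) (minX minY maxX maxY : Int)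
    (hminY : ∀ q ∈ piece, minY ≤ q.2) (hmaxY : ∀ q ∈ piece, q.2 ≤ maxY) :
    (List.range (maxX - minX + 1).toNat).map (fun (i : Nat) =>
      makePieceRow (maxY - minY + 1)
        (PySem.List.sorted
          (PySem.Set.ofList ((piece.filter (fun p => p.1 - minX == (i : Int))).map (fun p => p.2 - minY)))
          (fun v => v) false))
    = memGrid piece minX minY (maxX - minX + 1) (maxY - minY + 1) := by
  unfold memGrid
  apply List.map_congr_left
  intro i _
  set cols := PySem.List.sorted
      (PySem.Set.ofList ((piece.filter (fun p => p.1 - minX == (i : Int))).map (fun p => p.2 - minY)))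
      (fun v => v) false with hcols
  have hmemcols : ∀ j : Int, j ∈ cols ↔ ∃ q ∈ piece, q.1 - minX = (i : Int) ∧ q.2 - minY = j := by
    intro j
    rw [hcols, PySem.List.mem_sorted, PySem.Set.mem_ofList]
    simp only [List.mem_map, List.mem_filter]
    constructor
    · rintro ⟨q, ⟨hq, hq1⟩, rfl⟩
      exact ⟨q, hq, by simpa using hq1, rfl⟩
    · rintro ⟨q, hq, h1, rfl⟩
      exact ⟨q, ⟨hq, by simpa using h1⟩, rfl⟩
  have hpw : cols.Pairwise (· < ·) := PySem.List.sorted_ofList_pairwise_lt _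
  have hlo : ∀ c ∈ cols, (-1 : Int) < c := by
    intro c hc
    rcases (hmemcols c).1 hc with ⟨q, hq, _, rfl⟩
    have := hminY q hq; omega
  have hhi : ∀ c ∈ cols, c < maxY - minY + 1 := by
    intro c hc
    rcases (hmemcols c).1 hc with ⟨q, hq, _, rfl⟩
    have := hmaxY q hq; omega
  rw [makePieceRow_eq_rowRec, rowRec_eq_map _ _ _ hpw hlo hhi]
  have hWj : (maxY - minY + 1 - 1 - (-1 : Int)).toNat = (maxY - minY + 1).toNat := by omega
  rw [hWj]
  apply List.map_congr_left
  intro j _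
  have hidx : (-1 : Int) + 1 + (j : Int) = (j : Int) := by omega
  rw [hidx]
  have hmem2 : (j : Int) ∈ cols ↔ ((i : Int), (j : Int)) ∈ PySem.Set.ofList (piece.map (fun q => (q.1 - minX, q.2 - minY))) := by
    rw [hmemcols, PySem.Set.mem_ofList]
    simp only [List.mem_map]
    constructor
    · rintro ⟨q, hq, h1, h2⟩
      exact ⟨q, hq, by rw [h1, h2]⟩
    · rintro ⟨q, hq, hpair⟩
      have h1 : q.1 - minX = (i : Int) := congrArg Prod.fst hpair
      have h2 : q.2 - minY = (j : Int) := congrArg Prod.snd hpair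
      exact ⟨q, hq, h1, h2⟩
  by_cases hc : (j : Int) ∈ cols
  · rw [if_pos hc, if_pos (hmem2.1 hc)]
  · rw [if_neg hc, if_neg (fun h => hc (hmem2.2 h))]

-- ===== VERDICT (by name: the statement is the Claim_ definition above) =====
theorem makePiece_spec : Claim_equal_makePiece := by
  intro piece _ hpre
  unfold Spec_makePiece
  cases piece with
  | nil => exact absurd rfl hpre
  | cons p rest =>
    simp only [makePiece, makePiece_alt, List.isEmpty_cons, Bool.false_eq_true, if_false]
    cases hminX : PySem.List.min? ((p :: rest).map Prod.fst) (fun v => v) with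
    | none => rw [PySem.List.min?_eq_none_iff] at hminX; simp at hminX
    | some minX =>
    cases hmaxX : PySem.List.max? ((p :: rest).map Prod.fst) (fun v => v) with
    | none => rw [PySem.List.max?_eq_none_iff] at hmaxX; simp at hmaxX
    | some maxX =>
    cases hminY : PySem.List.min? ((p :: rest).map Prod.snd) (fun v => v) with
    | none => rw [PySem.List.min?_eq_none_iff] at hminY; simp at hminY
    | some minY =>
    cases hmaxY : PySem.List.max? ((p :: rest).map Prod.snd) (fun v => v) with
    | none => rw [PySem.List.max?_eq_none_iff] at hmaxY; simp at hmaxY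
    | some maxY =>
    simp only [Option.getD_some]
    have hA := grids_eq (p :: rest) minX minY maxX maxY
      (fun q hq => PySem.List.min?_isMin hminX q.1 (List.mem_map_of_mem hq))
      (fun q hq => PySem.List.max?_isMax hmaxX q.1 (List.mem_map_of_mem hq))
      (fun q hq => PySem.List.min?_isMin hminY q.2 (List.mem_map_of_mem hq))
      (fun q hq => PySem.List.max?_isMax hmaxY q.2 (List.mem_map_of_mem hq))
    have hB := alt_eq_memGrid (p :: rest) minX minY maxX maxY
      (fun q hq => PySem.List.min?_isMin hminY q.2 (List.mem_map_of_mem hq))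
      (fun q hq => PySem.List.max?_isMax hmaxY q.2 (List.mem_map_of_mem hq))
    rw [hA, hB]
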